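-- pv_equiv track=rewrite | github.com/SamujjwalSam/XC_GCN | text_process/text_process.py | remove_wiki_cats
-- ===== SOURCE A (Python) =====
-- def remove_wiki_cats(doc: list):
--     """ Removes category (and some irrelevant and repetitive) information from wiki pages.
--
--     :param doc:
--     """
--     for i,sent in enumerate(reversed(doc)):  ## Looping from the end of list till first match
--         if sent.lower().startswith("Categories:".lower()) or sent.lower().startswith("Category:".lower()):
--             del doc[-1]  ## Match found; remove from end before breaking
--             del doc[-1]
--             del doc[-1]
--             break
--         del doc[-1]  ## Need to remove from end
--     return doc
-- ===== SOURCE B (Python) =====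
-- def remove_wiki_cats(doc: list):
--     """Find the last wiki-category line, then truncate the list in place."""
--     idx = None
--     for i in range(len(doc) - 1, -1, -1):
--         low = doc[i].lower()
--         if low.startswith("categories:") or low.startswith("category:"):
--             idx = i
--             break
--     if idx is None:
--         del doc[:]
--         return doc
--     del doc[idx + 1:]
--     del doc[-1]
--     del doc[-1]
--     del doc[-1]
--     return doc
-- ===== Notes on version B (the rewrite author's own statement) =====
-- stated objective: alternative
-- what changed: A's single backward mutate-while-iterating loop (deleting from the end each step) is replaced by a pure find pass locating the last category-marker index followed by one truncation step.
-- outside the precondition, e.g. on remove_wiki_cats(['Category:x', 'a']): A raises IndexError, B raises IndexError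
import Mathlib
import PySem

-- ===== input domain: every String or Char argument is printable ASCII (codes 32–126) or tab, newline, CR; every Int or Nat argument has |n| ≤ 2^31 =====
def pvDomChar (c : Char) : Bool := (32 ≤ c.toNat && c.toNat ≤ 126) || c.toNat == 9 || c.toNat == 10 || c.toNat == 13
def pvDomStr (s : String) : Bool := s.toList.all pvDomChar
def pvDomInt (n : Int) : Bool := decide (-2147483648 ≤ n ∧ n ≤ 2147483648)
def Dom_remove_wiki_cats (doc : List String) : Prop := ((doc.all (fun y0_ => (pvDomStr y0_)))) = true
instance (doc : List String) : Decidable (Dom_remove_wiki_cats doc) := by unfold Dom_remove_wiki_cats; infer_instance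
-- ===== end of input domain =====

-- B replaces A's single mutate-while-iterating backward loop by a find-last-match
-- index pass followed by a truncation; same in-place mutation of `doc` in Python,
-- equivalence proved about the returned value.

-- `sent.lower().startswith("categories:") or sent.lower().startswith("category:")`
def pvMatchCat (s : String) : Bool :=
  PySem.Str.startswith (PySem.Str.lower s) "categories:" ||
  PySem.Str.startswith (PySem.Str.lower s) "category:"

-- ===== PORT A =====
-- A's loop walks the list from the end, `del doc[-1]` each step; the state seen
-- from the end is the reversed remainder. On a match it deletes three elements
-- from the end and breaks (Python raises IndexError if fewer than 3 remain; such
-- inputs are excluded by Pre_ below).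
def remove_wiki_cats_go : List String → List String
  | [] => []
  | s :: rest => if pvMatchCat s then rest.drop 2 else remove_wiki_cats_go rest

def remove_wiki_cats (doc : List String) : List String :=
  (remove_wiki_cats_go doc.reverse).reverse

-- ===== PORT B =====
-- `for i in range(len(doc)-1, -1, -1): ... break` — find the last matching index.
def remove_wiki_cats_alt_find (doc : List String) : Nat → Option Nat
  | 0 => none
  | k + 1 => if pvMatchCat (doc.getD k "") then some k else remove_wiki_cats_alt_find doc k

def remove_wiki_cats_alt (doc : List String) : List String :=
  match remove_wiki_cats_alt_find doc doc.length with
  | none => []                                  -- del doc[:]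
  | some i => (((doc.take (i + 1)).dropLast).dropLast).dropLast
      -- del doc[idx+1:]; del doc[-1] three times (IndexError if i < 2, excluded by Pre_)

-- ===== PRECONDITION & SPEC =====
-- Pre_ excludes exactly the inputs on which Python A raises IndexError: those whose
-- last category-matching line sits at index 0 or 1 (fewer than three elements remain
-- when the three `del doc[-1]` run). B raises there too.
def Pre_remove_wiki_cats (doc : List String) : Prop :=
  doc.any pvMatchCat = false ∨ (doc.drop 2).any pvMatchCat = true
instance (doc : List String) : Decidable (Pre_remove_wiki_cats doc) := by
  unfold Pre_remove_wiki_cats; infer_instance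

def pvWitness_remove_wiki_cats : List String := ["a", "b", "Category: Dogs", "see also"]

def Spec_remove_wiki_cats (doc : List String) (out : List String) : Prop := out = remove_wiki_cats_alt doc
instance (doc : List String) (out : List String) : Decidable (Spec_remove_wiki_cats doc out) := by unfold Spec_remove_wiki_cats; infer_instance

-- ===== CLAIM (what is proved, stated in full; the proofs are below) =====
def Claim_equal_remove_wiki_cats : Prop := ∀ (doc : List String), Dom_remove_wiki_cats doc → Pre_remove_wiki_cats doc → Spec_remove_wiki_cats doc (remove_wiki_cats doc)

-- ===== LEMMAS AND PROOFS =====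

-- the find loop only looks at indices < k, so a trailing element is invisible to it
theorem find_concat (xs : List String) (x : String) :
    ∀ k, k ≤ xs.length →
      remove_wiki_cats_alt_find (xs ++ [x]) k = remove_wiki_cats_alt_find xs k := by
  intro k
  induction k with
  | zero => intro _; rfl
  | succ k ih =>
    intro hk
    have hlt : k < xs.length := hk
    simp only [remove_wiki_cats_alt_find, List.getD, List.getElem?_append_left hlt,
      ih (Nat.le_of_lt hlt)]
    rfl

theorem find_lt (xs : List String) :
    ∀ k i, remove_wiki_cats_alt_find xs k = some i → i < k := by
  intro k
  induction k with
  | zero => intro i h; simp [remove_wiki_cats_alt_find] at h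
  | succ k ih =>
    intro i h
    simp only [remove_wiki_cats_alt_find] at h
    split at h
    · cases h; omega
    · exact Nat.lt_succ_of_lt (ih i h)

theorem rev_drop_two (l : List String) :
    (l.reverse.drop 2).reverse = l.dropLast.dropLast := by
  rw [List.reverse_drop, List.reverse_reverse, List.length_reverse,
    List.dropLast_eq_take, List.dropLast_eq_take, List.take_take,
    List.length_take]
  congr 1
  omega

theorem main_eq (doc : List String) :
    remove_wiki_cats doc = remove_wiki_cats_alt doc := by
  induction doc using List.reverseRecOn with
  | nil => rfl
  | append_singleton xs x ih =>
    unfold remove_wiki_cats remove_wiki_cats_alt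
    have hlen : (xs ++ [x]).length = xs.length + 1 := by simp
    rw [hlen, List.reverse_append]
    simp only [List.reverse_cons, List.reverse_nil, List.nil_append, List.cons_append,
      remove_wiki_cats_go, remove_wiki_cats_alt_find]
    have hget : (xs ++ [x]).getD xs.length "" = x := by
      simp [List.getD]
    rw [hget]
    by_cases hm : pvMatchCat x
    · -- match at the last element: both truncate two more from xs
      simp only [hm, if_pos]
      rw [rev_drop_two]
      have : (xs ++ [x]).take (xs.length + 1) = xs ++ [x] := by
        rw [← hlen, List.take_length]
      rw [this, List.dropLast_concat]
    · -- no match at the last element: reduce to the induction hypothesis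
      simp only [hm, if_false, Bool.false_eq_true]
      rw [find_concat xs x xs.length (Nat.le_refl _)]
      unfold remove_wiki_cats remove_wiki_cats_alt at ih
      cases hfind : remove_wiki_cats_alt_find xs xs.length with
      | none => rw [hfind] at ih; exact ih
      | some i =>
        rw [hfind] at ih
        have hi : i < xs.length := find_lt xs xs.length i hfind
        show (remove_wiki_cats_go xs.reverse).reverse =
          ((xs ++ [x]).take (i + 1)).dropLast.dropLast.dropLast
        rw [List.take_append_of_le_length (by omega : i + 1 ≤ xs.length)]
        exact ih

-- ===== VERDICT (by name: the statement is the Claim_ definition above) =====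
theorem remove_wiki_cats_spec : Claim_equal_remove_wiki_cats := by
  intro doc _ _
  unfold Spec_remove_wiki_cats
  exact main_eq doc
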